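-- pv_equiv track=rewrite | github.com/mizatrix/cs313x-course | public/static/chapter04/demos/06_skip_pointers.py | build_skip_list
-- ===== SOURCE A (Python) =====
-- import math, random
--
-- def build_skip_list(postings):
--     L = len(postings)
--     skip = max(1, int(math.sqrt(L)))
--     sl = []
--     for i, d in enumerate(postings):
--         st = i + skip if (i % skip == 0 and i + skip < L) else None
--         sl.append((d, st))
--     return sl, skip
-- ===== SOURCE B (Python) =====
-- import math
--
-- def build_skip_list(postings):
--     L = len(postings)
--     skip = max(1, int(math.sqrt(L)))
--     sl = []
--     start = 0
--     while start < L: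
--         nxt = start + skip
--         block = postings[start:nxt]
--         sl.append((block[0], nxt if nxt < L else None))
--         sl.extend((d, None) for d in block[1:])
--         start = nxt
--     return sl, skip
-- ===== Notes on version B (the rewrite author's own statement) =====
-- stated objective: alternative
-- what changed: A makes one enumerate pass testing i % skip == 0 at every element; B never computes an index test per element: it slices the postings into sqrt-sized blocks and for each block emits its head with a pointer to the next block start followed by the rest of the block with None, a chunked while-loop over slices.
import Mathlib
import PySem

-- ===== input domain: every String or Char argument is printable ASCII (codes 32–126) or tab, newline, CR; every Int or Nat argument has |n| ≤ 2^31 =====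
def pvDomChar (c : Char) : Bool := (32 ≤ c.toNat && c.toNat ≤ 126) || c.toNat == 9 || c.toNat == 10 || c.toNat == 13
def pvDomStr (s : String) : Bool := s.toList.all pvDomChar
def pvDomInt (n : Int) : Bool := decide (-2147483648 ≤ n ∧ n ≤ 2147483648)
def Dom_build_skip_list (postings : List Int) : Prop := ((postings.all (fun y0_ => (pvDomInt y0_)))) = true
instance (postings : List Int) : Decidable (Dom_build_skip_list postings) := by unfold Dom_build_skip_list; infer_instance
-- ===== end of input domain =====

-- B replaces A's per-element "i % skip == 0" enumerate pass by a chunked loop over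
-- sqrt-sized slices: each block contributes its head with a pointer and the rest with none
-- (alternative decomposition, same cost).

-- ===== PORT A =====
-- int(math.sqrt(L)) is ported as Nat.sqrt, exact for every feasible list length.
def build_skip_list (postings : List Int) : (List (Int × Option Int)) × Int :=
  let L : Int := postings.length
  let skip : Int := max 1 ((Nat.sqrt postings.length : Nat) : Int)
  let sl : List (Int × Option Int) :=
    (PySem.List.enumerate postings 0).foldl
      (fun sl p =>
        sl ++ [(p.2,
          if PySem.Int.mod p.1 skip = 0 ∧ p.1 + skip < L then some (p.1 + skip) else none)]) []
  (sl, skip)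

-- ===== PORT B =====
-- the while loop of Source B, one iteration per block (nxt = start + skip, block = postings[start:nxt]
-- written inline); block[0] is in range because start < L, so it is ported with pyGetD;
-- block[1:] is PySem.List.slice block 1 none. The proof argument hs only justifies termination.
def bChunks (postings : List Int) (L skip : Int) (hs : 1 ≤ skip) (start : Int) :
    List (Int × Option Int) :=
  if _h : start < L then
    (PySem.List.pyGetD (PySem.List.slice postings (some start) (some (start + skip))) 0 0,
      if start + skip < L then some (start + skip) else none)
      :: ((PySem.List.slice (PySem.List.slice postings (some start) (some (start + skip)))
             (some 1) none).map (fun d => (d, none))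
          ++ bChunks postings L skip hs (start + skip))
  else []
termination_by (L - start).toNat
decreasing_by omega

def build_skip_list_alt (postings : List Int) : (List (Int × Option Int)) × Int :=
  let L : Int := postings.length
  let skip : Int := max 1 ((Nat.sqrt postings.length : Nat) : Int)
  (bChunks postings L skip (le_max_left 1 _) 0, skip)

-- ===== PRECONDITION & SPEC =====
def Spec_build_skip_list (postings : List Int) (out : (List (Int × Option Int)) × Int) : Prop := out = build_skip_list_alt postings
instance (postings : List Int) (out : (List (Int × Option Int)) × Int) : Decidable (Spec_build_skip_list postings out) := by unfold Spec_build_skip_list; infer_instance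

-- ===== CLAIM (what is proved, stated in full; the proofs are below) =====
def Claim_equal_build_skip_list : Prop := ∀ (postings : List Int), Dom_build_skip_list postings → Spec_build_skip_list postings (build_skip_list postings)

-- ===== LEMMAS AND PROOFS =====

-- the per-element function of A's enumerate pass
def gfun (L skip : Int) (p : Int × Int) : Int × Option Int :=
  (p.2, if PySem.Int.mod p.1 skip = 0 ∧ p.1 + skip < L then some (p.1 + skip) else none)

-- indices strictly between two multiples of skip get a none pointer
lemma map_gfun_noMult (L : Int) (k : Nat) (xs : List Int) :
    ∀ (s : Nat), (∀ j : Nat, s ≤ j → j < s + xs.length → ¬ ((k : Int) ∣ (j : Int))) →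
      (PySem.List.enumerate xs (s : Int)).map (gfun L (k : Int)) =
        xs.map (fun d => (d, none)) := by
  induction xs with
  | nil => intro s _; simp [PySem.List.enumerate_nil]
  | cons x xs ih =>
    intro s hnd
    rw [PySem.List.enumerate_cons, List.map_cons, List.map_cons]
    have h0 : ¬ ((k : Int) ∣ (s : Int)) := hnd s (le_refl s) (by simp)
    have hmod : ¬ PySem.Int.mod (s : Int) (k : Int) = 0 := by
      rw [PySem.Int.mod_eq_zero_iff_dvd]; exact h0
    have hx : gfun L (k : Int) ((s : Int), x) = (x, none) := by
      simp only [gfun]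
      rw [if_neg (by rintro ⟨h1, _⟩; exact hmod h1)]
    rw [hx]
    have hcast : (s : Int) + 1 = ((s + 1 : Nat) : Int) := by push_cast; ring
    rw [hcast, ih (s + 1) (by intro j h1 h2; exact hnd j (by omega) (by simp at h2 ⊢; omega))]

lemma chunks_eq (postings : List Int) (k : Nat) (hk : 1 ≤ (k : Int)) :
    ∀ (fuel s : Nat), postings.length ≤ s + fuel → k ∣ s →
      bChunks postings (postings.length : Int) (k : Int) hk (s : Int) =
        (PySem.List.enumerate (postings.drop s) (s : Int)).map
          (gfun (postings.length : Int) (k : Int)) := by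
  intro fuel
  induction fuel with
  | zero =>
    intro s hle _
    rw [bChunks]
    rw [dif_neg (by exact_mod_cast Nat.not_lt.mpr (by omega))]
    rw [List.drop_eq_nil_of_le (by omega), PySem.List.enumerate_nil, List.map_nil]
  | succ fuel ih =>
    intro s hle hdvd
    by_cases hsn : postings.length ≤ s
    · rw [bChunks]
      rw [dif_neg (by exact_mod_cast Nat.not_lt.mpr hsn)]
      rw [List.drop_eq_nil_of_le hsn, PySem.List.enumerate_nil, List.map_nil]
    · replace hsn : s < postings.length := by omega
      rw [bChunks]
      rw [dif_pos (by exact_mod_cast hsn)]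
      have hkpos : 1 ≤ k := by exact_mod_cast hk
      -- the slice is take k of drop s
      have hcast : (s : Int) + (k : Int) = ((s + k : Nat) : Int) := by push_cast; ring
      have hslice : PySem.List.slice postings (some (s : Int)) (some ((s : Int) + (k : Int)))
          = (postings.drop s).take k := by
        rw [PySem.List.slice_natCast_add]
      -- decompose the rest list
      obtain ⟨b, bs, hrest⟩ := List.exists_cons_of_ne_nil
        (l := postings.drop s) (by rw [ne_eq, List.drop_eq_nil_iff]; omega)
      have hblock : (postings.drop s).take k = b :: bs.take (k - 1) := by
        rw [hrest]
        cases k with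
        | zero => omega
        | succ m => simp
      have hlenbs : bs.length = postings.length - s - 1 := by
        have := congrArg List.length hrest
        simp at this; omega
      -- split enumerate over block ++ remainder
      have hsplit : postings.drop s = (postings.drop s).take k ++ postings.drop (s + k) := by
        conv_lhs => rw [← List.take_append_drop k (postings.drop s)]
        simp [List.drop_drop, Nat.add_comm]
      conv_rhs => rw [hsplit]
      rw [PySem.List.enumerate_append, List.map_append]
      -- head of the block
      have hmod0 : PySem.Int.mod (s : Int) (k : Int) = 0 :=
        (PySem.Int.mod_eq_zero_iff_dvd _ _).mpr (by exact_mod_cast hdvd)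
      have hhead : gfun (postings.length : Int) (k : Int) ((s : Int), b)
          = (b, if (s : Int) + (k : Int) < (postings.length : Int)
                  then some ((s : Int) + (k : Int)) else none) := by
        simp [gfun, hmod0]
      rw [hblock, PySem.List.enumerate_cons, List.map_cons, hhead]
      -- the tail of the block: no multiples of k strictly inside the block
      have hnm : ∀ j : Nat, s + 1 ≤ j → j < s + 1 + (bs.take (k - 1)).length →
          ¬ ((k : Int) ∣ (j : Int)) := by
        intro j h1 h2 hdj
        have hjlen : (bs.take (k - 1)).length ≤ k - 1 := List.length_take_le _ _
        have hdj' : k ∣ j := by exact_mod_cast hdj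
        obtain ⟨a, ha⟩ := hdvd
        obtain ⟨c, hc⟩ := hdj'
        have hmul : k * a < k * c := by omega
        have hac : a + 1 ≤ c := Nat.lt_of_mul_lt_mul_left hmul
        have hge : s + k ≤ j := by
          calc s + k = k * (a + 1) := by rw [ha]; ring
            _ ≤ k * c := Nat.mul_le_mul_left k hac
            _ = j := hc.symm
        omega
      have hcast1 : (s : Int) + 1 = ((s + 1 : Nat) : Int) := by push_cast; ring
      rw [hcast1, map_gfun_noMult _ _ _ _ hnm]
      -- the recursive call
      have hrec : bChunks postings (postings.length : Int) (k : Int) hk ((s : Int) + (k : Int))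
          = (PySem.List.enumerate (postings.drop (s + k)) ((s + k : Nat) : Int)).map
              (gfun (postings.length : Int) (k : Int)) := by
        rw [hcast]
        exact ih (s + k) (by omega) (Dvd.dvd.add hdvd (dvd_refl k))
      by_cases hfit : s + k ≤ postings.length
      · -- the remainder's enumerate starts at s + block length = s + k
        have hstart : (s : Int) + ((b :: bs.take (k - 1)).length : Int) = ((s + k : Nat) : Int) := by
          have hl : (bs.take (k - 1)).length = k - 1 := by
            rw [List.length_take]; omega
          simp [hl]; omega
        rw [hstart, ← hrec, hslice, hblock, PySem.List.slice_from_one]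
        simp
      · -- remainder is empty; both tails vanish
        replace hfit : postings.length < s + k := by omega
        have hdropnil : postings.drop (s + k) = [] := List.drop_eq_nil_of_le (by omega)
        rw [hdropnil, PySem.List.enumerate_nil, List.map_nil, List.append_nil]
        have hnil : bChunks postings (postings.length : Int) (k : Int) hk ((s : Int) + (k : Int))
            = [] := by
          rw [hrec, hdropnil, PySem.List.enumerate_nil, List.map_nil]
        rw [hslice, hblock, PySem.List.slice_from_one, hnil]
        simp

-- ===== VERDICT (by name: the statement is the Claim_ definition above) =====
theorem build_skip_list_spec : Claim_equal_build_skip_list := by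
  intro postings _
  show build_skip_list postings = build_skip_list_alt postings
  unfold build_skip_list build_skip_list_alt
  simp only []
  have hmax : max 1 ((Nat.sqrt postings.length : Nat) : Int)
      = ((max 1 (Nat.sqrt postings.length) : Nat) : Int) := by push_cast; rfl
  refine congrArg (fun l => (l, max 1 ((Nat.sqrt postings.length : Nat) : Int))) ?_
  rw [PySem.List.foldl_append_singleton_eq_map, List.nil_append]
  have key := chunks_eq postings (max 1 (Nat.sqrt postings.length))
    (by push_cast; omega) postings.length 0 (by omega) (Dvd.intro 0 rfl)
  simp only [List.drop_zero, Nat.cast_zero] at key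
  simp only [hmax]
  exact key.symm
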